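-- pv_equiv track=rewrite | github.com/hhucn/argument-relevance-paper-results | Comparison/utils/Ranking.py | generate_ranking_from_aggregation
-- ===== SOURCE A (Python) =====
-- def generate_ranking_from_aggregation(aggregation_dict):
--     """
--     Replace the score values with the rank of the argument
--     aggregation
--     :param aggregation_dict: Dictionary of the aggregation results
--     :return: Results with ranks
--     """
--     return_dict = {}
--     for conclusion in aggregation_dict.keys():
--         score_values = [(key, value) for key, value in aggregation_dict[conclusion].items()]
--         unpacked_score_values = [value for key, value in score_values]
--         score_values_sorted = sorted(unpacked_score_values, key=lambda x: x, reverse=True)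
--
--         ranking = {}
--         for value in score_values:
--             ranking[value[0]] = score_values_sorted.index(value[1]) + 1
--
--         return_dict[conclusion] = ranking
--     return return_dict
-- ===== SOURCE B (Python) =====
-- def generate_ranking_from_aggregation(aggregation_dict):
--     """
--     Replace the score values with the rank of the argument aggregation
--     (competition ranking). The rank of a value is 1 plus the number of
--     strictly greater values, which needs no sorting at all.
--     """
--     return_dict = {}
--     for conclusion, scores in aggregation_dict.items():
--         values = list(scores.values())
--         return_dict[conclusion] = {
--             key: 1 + sum(1 for u in values if u > v)
--             for key, v in scores.items()
--         }
--     return return_dict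
-- ===== Notes on version B (the rewrite author's own statement) =====
-- stated objective: simpler
-- what changed: A sorts the values descending and calls sorted_list.index(v) for every entry; B drops the sort entirely and computes each rank directly by counting as 1 + (number of strictly greater values), which is the definition of competition rank.
import Mathlib
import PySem

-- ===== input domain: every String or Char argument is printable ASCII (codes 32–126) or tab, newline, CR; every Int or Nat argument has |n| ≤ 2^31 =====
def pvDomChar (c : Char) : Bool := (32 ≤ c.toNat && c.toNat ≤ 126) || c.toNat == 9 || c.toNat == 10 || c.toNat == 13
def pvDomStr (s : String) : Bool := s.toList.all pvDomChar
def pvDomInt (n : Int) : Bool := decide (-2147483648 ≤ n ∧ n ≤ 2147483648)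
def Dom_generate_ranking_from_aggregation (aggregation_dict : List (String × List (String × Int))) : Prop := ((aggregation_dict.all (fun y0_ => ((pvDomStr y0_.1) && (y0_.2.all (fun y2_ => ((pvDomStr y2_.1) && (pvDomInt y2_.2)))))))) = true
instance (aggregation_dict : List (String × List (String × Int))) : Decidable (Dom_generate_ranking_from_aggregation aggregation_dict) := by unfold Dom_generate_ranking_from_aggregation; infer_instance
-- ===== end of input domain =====

-- B drops A's sort-then-.index machinery: each rank is computed directly as
-- 1 + (number of strictly greater values) — a counting formulation (objective: simpler).

-- ===== PORT A =====
-- ranking loop of A: ranking[key] = score_values_sorted.index(value) + 1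
-- (.index is total here because every value occurs in the sorted list; getD 0 is never the raising case)
def pvRankingA (ssorted : List Int) (score_values : List (String × Int)) : PySem.Dict String Int :=
  score_values.foldl
    (fun r kv => r.insert kv.1 (((PySem.List.index? ssorted kv.2).getD 0 : Int) + 1))
    PySem.Dict.empty

def generate_ranking_from_aggregation (aggregation_dict : List (String × List (String × Int))) : List (String × List (String × Int)) :=
  (aggregation_dict.foldl
    (fun return_dict ci =>
      let score_values := ci.2
      let unpacked := score_values.map (·.2)
      let ssorted := PySem.List.sorted unpacked (fun x => x) true
      return_dict.insert ci.1 (pvRankingA ssorted score_values).items)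
    PySem.Dict.empty).items

-- ===== PORT B =====
-- sum(1 for u in values if u > v), the count of strictly greater values
def pvGreaterCount (values : List Int) (v : Int) : Int :=
  values.foldl (fun acc u => if v < u then acc + 1 else acc) 0

-- dict comprehension {key: 1 + pvGreaterCount values v for key, v in scores.items()}
def pvRankingB (values : List Int) (scores : List (String × Int)) : PySem.Dict String Int :=
  scores.foldl (fun r kv => r.insert kv.1 (1 + pvGreaterCount values kv.2)) PySem.Dict.empty

def generate_ranking_from_aggregation_alt (aggregation_dict : List (String × List (String × Int))) : List (String × List (String × Int)) :=
  (aggregation_dict.foldl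
    (fun return_dict ci =>
      let values := ci.2.map (·.2)
      return_dict.insert ci.1 (pvRankingB values ci.2).items)
    PySem.Dict.empty).items

-- ===== PRECONDITION & SPEC =====
def Spec_generate_ranking_from_aggregation (aggregation_dict : List (String × List (String × Int))) (out : List (String × List (String × Int))) : Prop := out = generate_ranking_from_aggregation_alt aggregation_dict
instance (aggregation_dict : List (String × List (String × Int))) (out : List (String × List (String × Int))) : Decidable (Spec_generate_ranking_from_aggregation aggregation_dict out) := by unfold Spec_generate_ranking_from_aggregation; infer_instance

-- ===== CLAIM (what is proved, stated in full; the proofs are below) =====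
def Claim_equal_generate_ranking_from_aggregation : Prop := ∀ (aggregation_dict : List (String × List (String × Int))), Dom_generate_ranking_from_aggregation aggregation_dict → Spec_generate_ranking_from_aggregation aggregation_dict (generate_ranking_from_aggregation aggregation_dict)

-- ===== LEMMAS AND PROOFS =====

-- in a descending list, the first occurrence of a member v sits right after the strictly-greater block
theorem index?_of_pairwise_ge (t : List Int) (v : Int)
    (hp : t.Pairwise (fun a b => b ≤ a)) (hv : v ∈ t) :
    PySem.List.index? t v = some (t.countP (fun u => decide (v < u))) := by
  induction t with
  | nil => cases hv
  | cons x r ih =>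
    rcases List.pairwise_cons.1 hp with ⟨hx, hr⟩
    by_cases hlt : v < x
    · have hne : x ≠ v := by omega
      have hvr : v ∈ r := by
        rcases List.mem_cons.1 hv with h | h
        · omega
        · exact h
      rw [PySem.List.index?_cons_of_ne r hne, ih hr hvr, List.countP_cons]
      simp [hlt]
    · have hveq : x = v := by
        rcases List.mem_cons.1 hv with h | h
        · omega
        · have := hx v h; omega
      subst hveq
      rw [PySem.List.index?_cons_self]
      have hz : (x :: r).countP (fun u => decide (x < u)) = 0 := by
        rw [List.countP_eq_zero]
        intro a ha
        rcases List.mem_cons.1 ha with h | h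
        · subst h; simp
        · have := hx a h; simp; omega
      rw [hz]

-- A's ".index in the sorted list + 1" equals B's "1 + count of strictly greater"
theorem rank_eq (s : List Int) (v : Int) (hv : v ∈ s) :
    ((PySem.List.index? (PySem.List.sorted s (fun x => x) true) v).getD 0 : Int) + 1
      = 1 + pvGreaterCount s v := by
  have hp : (PySem.List.sorted s (fun x => x) true).Pairwise (fun a b => b ≤ a) :=
    PySem.List.sorted_pairwise_rev s (fun x => x)
  have hvt : v ∈ PySem.List.sorted s (fun x => x) true :=
    (PySem.List.mem_sorted _ _ _ _).2 hv
  rw [index?_of_pairwise_ge _ v hp hvt]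
  have hperm : (PySem.List.sorted s (fun x => x) true).Perm s :=
    PySem.List.sorted_perm s (fun x => x) true
  rw [hperm.countP_eq]
  unfold pvGreaterCount
  rw [PySem.List.foldl_ite_add_one, Option.getD_some]
  omega

-- generic foldl congruence on the traversed elements
theorem pvFoldl_congr {α β : Type} (l : List α) (f g : β → α → β) (a : β)
    (h : ∀ b x, x ∈ l → f b x = g b x) : l.foldl f a = l.foldl g a := by
  induction l generalizing a with
  | nil => rfl
  | cons x t ih => simp only [List.foldl_cons, h a x (by simp)]; exact ih _ (fun b y hy => h b y (by simp [hy]))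

-- per conclusion, the two ranking dicts coincide
theorem pvRanking_eq (scores : List (String × Int)) :
    pvRankingA (PySem.List.sorted (scores.map (·.2)) (fun x => x) true) scores
      = pvRankingB (scores.map (·.2)) scores := by
  unfold pvRankingA pvRankingB
  apply pvFoldl_congr
  intro b kv hkv
  rw [rank_eq _ _ (List.mem_map_of_mem hkv)]

-- ===== VERDICT (by name: the statement is the Claim_ definition above) =====
theorem generate_ranking_from_aggregation_spec : Claim_equal_generate_ranking_from_aggregation := by
  intro agg _
  show generate_ranking_from_aggregation agg = generate_ranking_from_aggregation_alt agg
  unfold generate_ranking_from_aggregation generate_ranking_from_aggregation_alt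
  refine congrArg PySem.Dict.items (pvFoldl_congr _ _ _ _ (fun rd ci _ => ?_)
  )
  show rd.insert ci.1 (pvRankingA (PySem.List.sorted (ci.2.map (·.2)) (fun x => x) true) ci.2).items
      = rd.insert ci.1 (pvRankingB (ci.2.map (·.2)) ci.2).items
  rw [pvRanking_eq]
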